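-- pv_equiv track=rewrite | github.com/helloworldjay/Algorithm | Programmers/2021 식스샵/2번.py | solution
-- ===== SOURCE A (Python) =====
-- def solution(grade):
--     result = [0 for _ in range(len(grade))]
--     grade_check = []
--     for index, score in enumerate(grade):
--         grade_check.append((score, index))
--     grade_check.sort(reverse=True)
--     ranking = 0
--     score = 1000000001
--     for i in range(len(grade_check)):
--         check_grade, check_index = grade_check[i]
--         if score > check_grade:
--             ranking = i + 1
--             result[check_index] = ranking
--             score = check_grade
--         elif score == check_grade:
--             result[check_index] = ranking
--     return result
-- ===== SOURCE B (Python) =====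
-- def solution(grade):
--     return [1 + len([g for g in grade if g > s]) for s in grade]
-- ===== Notes on version B (the rewrite author's own statement) =====
-- stated objective: simpler
-- what changed: Replaces building an (score,index) list, sorting it in reverse and running a stateful ranking pass with a direct one-line count: each element's rank is 1 plus the number of strictly greater scores.
-- intended difference: On lists containing a score >= 1000000001, A's sentinel initial score (1000000001, meant as +infinity for the problem's bounded scores) fails to exceed those scores, so A leaves their rank at the initial 0 (or the stale ranking 0), while B returns the intended competition rank (1 + number of strictly greater scores). — e.g. on solution([2000000000]): A returns [0], B returns [1]
import Mathlib
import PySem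

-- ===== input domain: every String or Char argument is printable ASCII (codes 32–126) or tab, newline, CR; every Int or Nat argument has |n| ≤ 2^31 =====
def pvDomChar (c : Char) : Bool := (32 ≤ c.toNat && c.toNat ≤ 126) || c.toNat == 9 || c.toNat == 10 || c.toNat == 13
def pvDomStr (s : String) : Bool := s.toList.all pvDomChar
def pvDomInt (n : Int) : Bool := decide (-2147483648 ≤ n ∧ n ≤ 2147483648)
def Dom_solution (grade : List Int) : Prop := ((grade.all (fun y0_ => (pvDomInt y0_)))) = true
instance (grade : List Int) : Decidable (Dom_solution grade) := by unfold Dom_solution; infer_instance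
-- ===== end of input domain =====

-- B computes each competition rank directly as 1 + (number of strictly greater scores),
-- replacing A's sort + stateful ranking pass (objective: simpler, not faster).

-- ===== PORT A =====
def solution (grade : List Int) : List Int :=
  let result : List Int := (PySem.List.pyRange 0 (grade.length : Int) 1).map (fun _ => (0 : Int))
  let grade_check : List (Int × Int) :=
    (PySem.List.enumerate grade).foldl (fun acc p => acc ++ [(p.2, p.1)]) []
  let grade_check := PySem.List.sorted2 grade_check (fun p => p.1) (fun p => p.2) true
  let st :=
    (PySem.List.pyRange 0 (grade_check.length : Int) 1).foldl
      (fun (st : List Int × Int × Int) i =>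
        match st with
        | (result, ranking, score) =>
          let c := PySem.List.pyGetD grade_check i (0, 0)
          if score > c.1 then
            (PySem.List.pySetD result c.2 (i + 1), i + 1, c.1)
          else if score == c.1 then
            (PySem.List.pySetD result c.2 ranking, ranking, score)
          else
            (result, ranking, score))
      (result, 0, 1000000001)
  st.1

-- ===== PORT B =====
def solution_alt (grade : List Int) : List Int :=
  grade.map (fun s => 1 + ((grade.filter (fun g => decide (s < g))).length : Int))

-- ===== PRECONDITION & SPEC =====
-- On lists containing a score >= 1000000001, A's sentinel initial score (1000000001, meant as
-- +infinity for the problem's bounded scores) fails to exceed those scores, so A leaves their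
-- rank at 0, while B returns the intended competition rank (1 + number of strictly greater scores).
def D_solution (grade : List Int) : Prop := ∃ g ∈ grade, (1000000001 : Int) ≤ g
instance (grade : List Int) : Decidable (D_solution grade) := by unfold D_solution; infer_instance

def Spec_solution (grade : List Int) (out : List Int) : Prop := ¬ D_solution grade → out = solution_alt grade
instance (grade : List Int) (out : List Int) : Decidable (Spec_solution grade out) := by unfold Spec_solution; infer_instance

def pvDiffWitness_solution : List Int := [2000000000]
def pvDiffWitnessOut_solution : (List Int) × (List Int) := ([0], [1])

-- ===== CLAIM (what is proved, stated in full; the proofs are below) =====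
def Claim_unchanged_solution : Prop := ∀ (grade : List Int), Dom_solution grade → Spec_solution grade (solution grade)
def Claim_changed_solution : Prop := Dom_solution (pvDiffWitness_solution) ∧ D_solution (pvDiffWitness_solution) ∧ solution (pvDiffWitness_solution) = pvDiffWitnessOut_solution.1 ∧ solution_alt (pvDiffWitness_solution) = pvDiffWitnessOut_solution.2 ∧ pvDiffWitnessOut_solution.1 ≠ pvDiffWitnessOut_solution.2
def Claim_exact_solution : Prop := ∀ (grade : List Int), Dom_solution grade → D_solution grade → solution grade ≠ solution_alt grade

-- ===== LEMMAS AND PROOFS =====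

-- B's rank of a score: 1 + number of strictly greater scores.
def rankOf (grade : List Int) (s : Int) : Int := 1 + (grade.countP (fun g => decide (s < g)) : Int)

-- the (score, index) pairs A builds before sorting
def pairsOf (grade : List Int) : List (Int × Int) :=
  (PySem.List.enumerate grade).map (fun p => (p.2, p.1))

-- A's ranking loop, recast as structural recursion over the sorted list with a position counter
def goA : List (Int × Int) → Int → List Int × Int × Int → List Int × Int × Int
  | [], _, st => st
  | c :: t, i, (result, ranking, score) =>
    if score > c.1 then goA t (i + 1) (PySem.List.pySetD result c.2 (i + 1), i + 1, c.1)
    else if score == c.1 then goA t (i + 1) (PySem.List.pySetD result c.2 ranking, ranking, score)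
    else goA t (i + 1) (result, ranking, score)

-- the loop body of A's port, named so the index-fold / structural-recursion bridge can be stated
def bodyA (gc : List (Int × Int)) (st : List Int × Int × Int) (i : Int) : List Int × Int × Int :=
  match st with
  | (result, ranking, score) =>
    let c := PySem.List.pyGetD gc i (0, 0)
    if score > c.1 then
      (PySem.List.pySetD result c.2 (i + 1), i + 1, c.1)
    else if score == c.1 then
      (PySem.List.pySetD result c.2 ranking, ranking, score)
    else
      (result, ranking, score)

lemma foldl_bodyA (todo : List (Int × Int)) : ∀ (pre : List (Int × Int)) (st : List Int × Int × Int),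
    (PySem.List.pyRange (pre.length : Int) ((pre.length : Int) + (todo.length : Int)) 1).foldl
      (bodyA (pre ++ todo)) st
    = goA todo (pre.length : Int) st := by
  induction todo with
  | nil =>
    intro pre st
    rw [show ((pre.length : Int) + (([] : List (Int × Int)).length : Int)) = (pre.length : Int) by simp,
        PySem.List.pyRange_one_eq_nil le_rfl]
    simp [goA]
  | cons c t ih =>
    intro pre st
    rw [PySem.List.pyRange_one_cons
        (by simp only [List.length_cons]; push_cast; omega)]
    simp only [List.foldl_cons]
    have hc : PySem.List.pyGetD (pre ++ c :: t) (pre.length : Int) ((0 : Int), (0 : Int)) = c := by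
      rw [PySem.List.pyGetD_natCast]
      simp [List.getD]
    obtain ⟨result, ranking, score⟩ := st
    have hpre : pre ++ c :: t = (pre ++ [c]) ++ t := by simp
    have hrange : PySem.List.pyRange ((pre.length : Int) + 1)
          ((pre.length : Int) + ((c :: t).length : Int)) 1
        = PySem.List.pyRange (((pre ++ [c]).length : Int))
          (((pre ++ [c]).length : Int) + ((t).length : Int)) 1 := by
      congr 1 <;> simp only [List.length_append, List.length_cons, List.length_nil] <;>
        push_cast <;> ring
    have hlen : ((pre ++ [c]).length : Int) = (pre.length : Int) + 1 := by
      simp only [List.length_append, List.length_cons, List.length_nil]; push_cast; ring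
    have key : ∀ st', List.foldl (bodyA (pre ++ c :: t)) st'
          (PySem.List.pyRange ((pre.length : Int) + 1) ((pre.length : Int) + ((c :: t).length : Int)) 1)
        = goA t ((pre.length : Int) + 1) st' := by
      intro st'
      rw [hpre, hrange, ih (pre ++ [c]) st', hlen]
    rw [key]
    simp only [bodyA, hc, goA]
    split_ifs <;> rfl

lemma mem_enumerate_swap (xs : List Int) : ∀ (s : Int) (q : Int × Int),
    q ∈ (PySem.List.enumerate xs s).map (fun p => (p.2, p.1)) ↔
      ∃ j : Nat, j < xs.length ∧ q = (xs.getD j 0, s + (j : Int)) := by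
  induction xs with
  | nil => intro s q; simp [PySem.List.enumerate_nil]
  | cons x t ih =>
    intro s q
    rw [PySem.List.enumerate_cons]
    simp only [List.map_cons, List.mem_cons, ih (s + 1) q]
    constructor
    · rintro (h | ⟨j, hj, hq⟩)
      · exact ⟨0, by simp, by simpa using h⟩
      · refine ⟨j + 1, by simpa using hj, ?_⟩
        simp only [hq, List.getD_cons_succ]
        congr 1
        push_cast; ring
    · rintro ⟨j, hj, hq⟩
      cases j with
      | zero => left; simpa using hq
      | succ j =>
        right
        refine ⟨j, by simpa using hj, ?_⟩
        simp only [hq, List.getD_cons_succ]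
        congr 1
        push_cast; ring

lemma mem_pairsOf (grade : List Int) (q : Int × Int) :
    q ∈ pairsOf grade ↔ ∃ j : Nat, j < grade.length ∧ q = (grade.getD j 0, (j : Int)) := by
  unfold pairsOf
  simpa using mem_enumerate_swap grade 0 q

lemma countP_pairsOf (grade : List Int) (s : Int) :
    (pairsOf grade).countP (fun q => decide (s < q.1)) = grade.countP (fun g => decide (s < g)) := by
  unfold pairsOf
  rw [List.countP_map]
  conv_rhs => rw [← PySem.List.map_snd_enumerate grade 0, List.countP_map]
  rfl

lemma goA_inv (grade : List Int) (hsmall : ∀ g ∈ grade, g < 1000000001) :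
    ∀ (todo pre : List (Int × Int)) (result : List Int) (ranking score : Int),
      (pre ++ todo).Perm (pairsOf grade) →
      (pre ++ todo).Pairwise (fun a b => b.1 ≤ a.1) →
      (∀ q ∈ pre, score ≤ q.1) →
      (∀ q ∈ todo, q.1 ≤ score) →
      (score = 1000000001 ∨ ranking = rankOf grade score) →
      result.length = grade.length →
      (∀ j : Nat, (∃ q ∈ pre, q.2 = (j : Int)) → result.getD j 0 = rankOf grade (grade.getD j 0)) →
      ((goA todo (pre.length : Int) (result, ranking, score)).1.length = grade.length ∧
       ∀ j : Nat, (∃ q ∈ pre ++ todo, q.2 = (j : Int)) →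
         (goA todo (pre.length : Int) (result, ranking, score)).1.getD j 0
           = rankOf grade (grade.getD j 0)) := by
  intro todo
  induction todo with
  | nil =>
    intro pre result ranking score _ _ _ _ _ hlen hres
    exact ⟨hlen, fun j hj => hres j (by simpa using hj)⟩
  | cons c t ih =>
    intro pre result ranking score hperm hpw hgepre htodo hscore hlen hres
    -- c is an (score, index) pair of grade
    have hcmem : c ∈ pairsOf grade := hperm.subset (by simp)
    obtain ⟨j0, hj0, rfl⟩ := (mem_pairsOf grade c).mp hcmem
    have hc1mem : grade.getD j0 0 ∈ grade := by
      rw [List.getD_eq_getElem grade 0 hj0]; exact List.getElem_mem hj0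
    have hpre2 : pre ++ (grade.getD j0 0, (j0 : Int)) :: t = (pre ++ [(grade.getD j0 0, (j0 : Int))]) ++ t := by
      simp
    have hpwt : ∀ q ∈ t, q.1 ≤ grade.getD j0 0 := by
      have h1 := (List.pairwise_append.mp hpw).2.1
      intro q hq
      exact (List.pairwise_cons.mp h1).1 q hq
    have hlen2 : ((pre ++ [(grade.getD j0 0, (j0 : Int))]).length : Int) = (pre.length : Int) + 1 := by
      simp only [List.length_append, List.length_cons, List.length_nil]; push_cast; ring
    -- shared: the updated result after writing v = rankOf at index j0
    have hset : ∀ v, v = rankOf grade (grade.getD j0 0) →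
        ∀ j : Nat, (∃ q ∈ pre ++ [(grade.getD j0 0, (j0 : Int))], q.2 = (j : Int)) →
          (PySem.List.pySetD result (j0 : Int) v).getD j 0 = rankOf grade (grade.getD j 0) := by
      intro v hv j hj
      rw [PySem.List.pySetD_natCast]
      by_cases hjj : j = j0
      · subst hjj
        rw [List.getD_eq_getElem?_getD, List.getElem?_set_self (by omega), Option.getD_some, hv]
      · obtain ⟨q, hq, hq2⟩ := hj
        rcases List.mem_append.mp hq with hq | hq
        · rw [List.getD_eq_getElem?_getD, List.getElem?_set_ne (by omega),
            ← List.getD_eq_getElem?_getD]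
          exact hres j ⟨q, hq, hq2⟩
        · simp only [List.mem_singleton] at hq
          subst hq
          simp only at hq2
          exact absurd (by exact_mod_cast hq2.symm) hjj
    have hlenset : ∀ v : Int, (PySem.List.pySetD result ((j0 : Nat) : Int) v).length = grade.length := by
      intro v
      rw [PySem.List.pySetD_natCast, List.length_set, hlen]
    have hgoal : ∀ (st' : List Int × Int × Int),
        goA ((grade.getD j0 0, (j0 : Int)) :: t) (pre.length : Int) (result, ranking, score)
          = goA t ((pre.length : Int) + 1) st' →
        (st'.1.length = grade.length) →
        (∀ j : Nat, (∃ q ∈ pre ++ [(grade.getD j0 0, (j0 : Int))], q.2 = (j : Int)) →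
          st'.1.getD j 0 = rankOf grade (grade.getD j 0)) →
        (∀ q ∈ pre ++ [(grade.getD j0 0, (j0 : Int))], st'.2.2 ≤ q.1) →
        (∀ q ∈ t, q.1 ≤ st'.2.2) →
        (st'.2.1 = rankOf grade st'.2.2) →
        ((goA ((grade.getD j0 0, (j0 : Int)) :: t) (pre.length : Int) (result, ranking, score)).1.length = grade.length ∧
         ∀ j : Nat, (∃ q ∈ pre ++ (grade.getD j0 0, (j0 : Int)) :: t, q.2 = (j : Int)) →
           (goA ((grade.getD j0 0, (j0 : Int)) :: t) (pre.length : Int) (result, ranking, score)).1.getD j 0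
             = rankOf grade (grade.getD j 0)) := by
      rintro ⟨res', rank', sc'⟩ heq hl hr hge hle hsc
      rw [heq, show ((pre.length : Int) + 1) = ((pre ++ [(grade.getD j0 0, (j0 : Int))]).length : Int) from hlen2.symm]
      have := ih (pre ++ [(grade.getD j0 0, (j0 : Int))]) res' rank' sc'
        (by rw [← hpre2]; exact hperm)
        (by rw [← hpre2]; exact hpw)
        hge hle (Or.inr hsc) hl hr
      refine ⟨this.1, fun j hj => this.2 j ?_⟩
      rw [← hpre2]
      exact hj
    by_cases h1 : score > (grade.getD j0 0, (j0 : Int)).1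
    · -- new strictly smaller score: ranking becomes position + 1
      have hcount : grade.countP (fun g => decide (grade.getD j0 0 < g)) = pre.length := by
        rw [← countP_pairsOf, ← hperm.countP_eq]
        rw [List.countP_append, List.countP_cons]
        have hp : (pre.countP fun q => decide (grade.getD j0 0 < q.1)) = pre.length :=
          List.countP_eq_length.mpr (fun q hq => by
            simpa using lt_of_lt_of_le h1 (hgepre q hq))
        have ht : (t.countP fun q => decide (grade.getD j0 0 < q.1)) = 0 :=
          List.countP_eq_zero.mpr (fun q hq => by
            simpa using not_lt.mpr (hpwt q hq))
        simp only [List.getD] at hp ht ⊢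
        rw [hp, ht]
        simp
      have hv : (pre.length : Int) + 1 = rankOf grade (grade.getD j0 0) := by
        rw [rankOf, hcount]; ring
      refine hgoal (PySem.List.pySetD result ((j0 : Nat) : Int) ((pre.length : Int) + 1),
          (pre.length : Int) + 1, grade.getD j0 0) ?_ (hlenset _) (hset _ hv) ?_ hpwt ?_
      · simp only [goA]
        rw [if_pos h1]
      · intro q hq
        rcases List.mem_append.mp hq with hq | hq
        · exact le_of_lt (lt_of_lt_of_le h1 (hgepre q hq))
        · simp only [List.mem_singleton] at hq
          rw [hq]
      · exact hv
    · by_cases h2 : score == (grade.getD j0 0, (j0 : Int)).1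
      · -- tie: reuse the current ranking
        have hsceq : score = grade.getD j0 0 := by simpa using h2
        have hrank : ranking = rankOf grade score := by
          refine hscore.resolve_left ?_
          intro hsent
          have := hsmall _ hc1mem
          omega
        refine hgoal (PySem.List.pySetD result ((j0 : Nat) : Int) ranking, ranking, score)
            ?_ (hlenset _) (hset _ (by rw [hrank, hsceq])) ?_ ?_ hrank
        · simp only [goA]
          rw [if_neg h1, if_pos h2]
        · intro q hq
          rcases List.mem_append.mp hq with hq | hq
          · exact hgepre q hq
          · simp only [List.mem_singleton] at hq
            rw [hq, ← hsceq]
        · intro q hq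
          rw [hsceq]
          exact hpwt q hq
      · -- impossible: the sorted score can never exceed the running score
        exfalso
        have hc : (grade.getD j0 0, (j0 : Int)).1 ≤ score := htodo _ (by simp)
        have : score = grade.getD j0 0 := le_antisymm (not_lt.mp h1) hc
        simp [this] at h2

lemma sorted2_rev_eq_sorted_lex (xs : List (Int × Int)) :
    PySem.List.sorted2 xs (fun p => p.1) (fun p => p.2) true
      = PySem.List.sorted xs (fun p => toLex (p.1, p.2)) true := by
  have hb : (fun (a b : Int × Int) => decide (b.1 < a.1) || (!decide (a.1 < b.1) && decide (b.2 < a.2)))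
      = (fun (a b : Int × Int) => decide ((toLex ((b.1 : Int), (b.2 : Int))) < toLex (a.1, a.2))) := by
    funext a b
    by_cases h1 : b.1 < a.1 <;> by_cases h2 : a.1 < b.1 <;> by_cases h3 : b.2 < a.2 <;>
      simp [Prod.Lex.lt_iff, h1, h2, h3] <;> omega
  show List.foldl (fun acc x => PySem.List.insertBy _ x acc) [] xs
     = List.foldl (fun acc x => PySem.List.insertBy _ x acc) [] xs
  rw [show (fun (a b : Int × Int) => decide (b.1 < a.1) || (!decide (a.1 < b.1) && decide (b.2 < a.2)))
      = _ from hb]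
  rfl

lemma solution_eq_goA (grade : List Int) :
    solution grade
      = (goA (PySem.List.sorted2 (pairsOf grade) (fun p => p.1) (fun p => p.2) true) 0
          ((PySem.List.pyRange 0 (grade.length : Int) 1).map (fun _ => (0 : Int)), 0, 1000000001)).1 := by
  unfold solution
  simp only [PySem.List.foldl_append_singleton_eq_map, List.nil_append]
  rw [show (PySem.List.enumerate grade).map (fun p => (p.2, p.1)) = pairsOf grade from rfl]
  set gc := PySem.List.sorted2 (pairsOf grade) (fun p => p.1) (fun p => p.2) true with hgc
  have hbridge := foldl_bodyA gc [] ((PySem.List.pyRange 0 (grade.length : Int) 1).map (fun _ => (0 : Int)), 0, 1000000001)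
  simp only [List.length_nil, Nat.cast_zero, List.nil_append, zero_add] at hbridge
  rw [show ((fun (st : List Int × Int × Int) i =>
        match st with
        | (result, ranking, score) =>
          let c := PySem.List.pyGetD gc i (0, 0)
          if score > c.1 then (PySem.List.pySetD result c.2 (i + 1), i + 1, c.1)
          else if score == c.1 then (PySem.List.pySetD result c.2 ranking, ranking, score)
          else (result, ranking, score)) : List Int × Int × Int → Int → List Int × Int × Int)
      = bodyA gc from rfl]
  rw [hbridge]

lemma solution_eq (grade : List Int) (hsmall : ∀ g ∈ grade, g < 1000000001) :
    solution grade = solution_alt grade := by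
  rw [solution_eq_goA]
  unfold solution_alt
  set gc := PySem.List.sorted2 (pairsOf grade) (fun p => p.1) (fun p => p.2) true with hgc
  have hperm : gc.Perm (pairsOf grade) := by
    rw [hgc]; exact PySem.List.sorted2_perm _ _ _ _
  have hpw : gc.Pairwise (fun a b => b.1 ≤ a.1) := by
    rw [hgc, sorted2_rev_eq_sorted_lex]
    refine (PySem.List.sorted_pairwise_rev _ _).imp ?_
    intro a b h
    rcases Prod.Lex.le_iff.mp h with h | ⟨h, _⟩
    · exact le_of_lt h
    · exact le_of_eq h
  have hinit_len : ((PySem.List.pyRange 0 (grade.length : Int) 1).map (fun _ => (0 : Int))).length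
      = grade.length := by
    rw [List.length_map, PySem.List.length_pyRange_one]
    omega
  have hinv := goA_inv grade hsmall gc [] _ 0 1000000001
    (by simpa using hperm) (by simpa using hpw)
    (by simp) (by
      intro q hq
      have hq' := hperm.subset hq
      obtain ⟨j, hj, rfl⟩ := (mem_pairsOf grade q).mp hq'
      have : grade.getD j 0 ∈ grade := by
        rw [List.getD_eq_getElem grade 0 hj]; exact List.getElem_mem hj
      exact le_of_lt (hsmall _ this))
    (Or.inl rfl) hinit_len (by simp)
  simp only [List.length_nil, Nat.cast_zero, List.nil_append] at hinv
  obtain ⟨hflen, hfval⟩ := hinv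
  apply List.ext_getElem (by rw [hflen, List.length_map])
  intro j hj1 hj2
  have hjn : j < grade.length := by rwa [hflen] at hj1
  have hwit : ∃ q ∈ gc, q.2 = (j : Int) := by
    refine ⟨(grade.getD j 0, (j : Int)), ?_, rfl⟩
    exact hperm.mem_iff.mpr ((mem_pairsOf grade _).mpr ⟨j, hjn, rfl⟩)
  have := hfval j hwit
  rw [List.getD_eq_getElem _ 0 hj1] at this
  rw [this, List.getElem_map]
  rw [rankOf, List.getD_eq_getElem grade 0 hjn, List.countP_eq_length_filter]

-- at an index whose score is at least the sentinel, A's loop only ever writes the stale ranking 0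
lemma goA_zero (j : Nat) :
    ∀ (todo : List (Int × Int)) (i : Int) (result : List Int) (ranking score : Int),
      (∀ q ∈ todo, 0 ≤ q.2) →
      (∀ q ∈ todo, q.2 = (j : Int) → (1000000001 : Int) ≤ q.1) →
      score ≤ 1000000001 →
      (score = 1000000001 → ranking = 0) →
      result.getD j 0 = 0 →
      (goA todo i (result, ranking, score)).1.getD j 0 = 0 := by
  intro todo
  induction todo with
  | nil => intro i result ranking score _ _ _ _ h0; exact h0
  | cons c t ih =>
    intro i result ranking score hpos hbig hle hrank h0
    have hcpos : 0 ≤ c.2 := hpos c (by simp)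
    have hset_ne : ∀ v : Int, c.2 ≠ (j : Int) →
        (PySem.List.pySetD result c.2 v).getD j 0 = 0 := by
      intro v hne
      rw [PySem.List.pySetD_of_nonneg _ _ hcpos, List.getD_eq_getElem?_getD,
        List.getElem?_set_ne (by omega), ← List.getD_eq_getElem?_getD]
      exact h0
    simp only [goA]
    split_ifs with h1 h2
    · -- strictly smaller score: this branch cannot touch index j
      have hne : c.2 ≠ (j : Int) := by
        intro he
        have := hbig c (by simp) he
        omega
      exact ih (i + 1) _ (i + 1) c.1 (fun q hq => hpos q (by simp [hq]))
        (fun q hq hqe => hbig q (by simp [hq]) hqe) (by omega) (by omega) (hset_ne _ hne)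
    · -- tie with the running score: the ranking written is the stale 0
      have hsc : score = c.1 := by simpa using h2
      refine ih (i + 1) _ ranking score (fun q hq => hpos q (by simp [hq]))
        (fun q hq hqe => hbig q (by simp [hq]) hqe) hle hrank ?_
      by_cases hne : c.2 = (j : Int)
      · have hS : score = 1000000001 := le_antisymm hle (by rw [hsc]; exact hbig c (by simp) hne)
        rw [hrank hS, PySem.List.pySetD_of_nonneg _ _ hcpos, List.getD_eq_getElem?_getD]
        rw [List.getElem?_set]
        split_ifs with hj1 hj2
        · simp
        · simp
        · rw [← List.getD_eq_getElem?_getD]; exact h0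
      · exact hset_ne _ hne
    · exact ih (i + 1) _ ranking score (fun q hq => hpos q (by simp [hq]))
        (fun q hq hqe => hbig q (by simp [hq]) hqe) hle hrank h0

lemma solution_alt_getD_ne_zero (grade : List Int) (j : Nat) (hj : j < grade.length) :
    (solution_alt grade).getD j 0 ≠ 0 := by
  unfold solution_alt
  rw [List.getD_eq_getElem?_getD, List.getElem?_map, List.getElem?_eq_getElem hj]
  simp only [Option.map_some, Option.getD_some]
  have := Int.natCast_nonneg ((grade.filter (fun g => decide (grade[j] < g))).length)
  omega

-- ===== VERDICT (by name: the statement is the Claim_ definition above) =====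
theorem solution_spec : Claim_unchanged_solution := by
  unfold Claim_unchanged_solution Spec_solution
  intro grade _ hD
  refine solution_eq grade ?_
  intro g hg
  by_contra h
  exact hD ⟨g, hg, by omega⟩

theorem solution_changed : Claim_changed_solution := by
  unfold Claim_changed_solution; decide

theorem solution_tight : Claim_exact_solution := by
  unfold Claim_exact_solution
  intro grade _ hD heq
  obtain ⟨g, hg, hgS⟩ := hD
  obtain ⟨j, hj, hgj⟩ := List.getElem_of_mem hg
  have hperm := PySem.List.sorted2_perm (pairsOf grade) (fun p => p.1) (fun p => p.2) true
  have hA : (solution grade).getD j 0 = 0 := by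
    rw [solution_eq_goA]
    apply goA_zero
    · intro q hq
      obtain ⟨j', _, rfl⟩ := (mem_pairsOf grade q).mp (hperm.subset hq)
      simp
    · intro q hq hqe
      obtain ⟨j', hj', rfl⟩ := (mem_pairsOf grade q).mp (hperm.subset hq)
      simp only at hqe
      have : j' = j := by exact_mod_cast hqe
      subst this
      rw [List.getD_eq_getElem grade 0 hj', hgj]
      exact hgS
    · exact le_rfl
    · intro _; rfl
    · rw [List.getD_eq_getElem?_getD, List.getElem?_map]
      cases (PySem.List.pyRange 0 (grade.length : Int) 1)[j]? <;> simp
  rw [heq] at hA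
  exact solution_alt_getD_ne_zero grade j hj hA
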